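-- pv_equiv track=rewrite | github.com/aakok/algorithms | zero_replace_to_maximum_length_sequence_of_continuous_ones/_python/longest_one_seq.py | longest_one_seq
-- ===== SOURCE A (Python) =====
-- def get_zero_index(arr, start, end):
--     zero_count = 0
--     idx = 0
--     for i in range(start, end):
--         if arr[i] == 0:
--             zero_count += 1
--             idx = i
--     if zero_count != 1:
--         return -1
--     else:
--         return idx
--
-- def longest_one_seq(arr):
--     length = 0
--     idx = -1
--     for i in range(arr.__len__()):
--         for j in range(i+1, arr.__len__()+1):
--             zero_idx = get_zero_index(arr, i, j)
--             if zero_idx < 0: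
--                 continue
--             else:
--                 if j - i > length:
--                     idx = zero_idx
--                     length = j - i
--     return idx
-- ===== SOURCE B (Python) =====
-- def longest_one_seq(arr):
--     # One running zero-count/last-zero pass per start index: the inner
--     # get_zero_index rescan of A disappears (O(n^2) instead of O(n^3)).
--     n = len(arr)
--     length = 0
--     idx = -1
--     for i in range(n):
--         zeros = 0
--         last = -1
--         for j in range(i, n):
--             if arr[j] == 0:
--                 zeros += 1
--                 last = j
--             if zeros == 1 and j + 1 - i > length:
--                 length = j + 1 - i
--                 idx = last
--     return idx
-- ===== Notes on version B (the rewrite author's own statement) =====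
-- stated objective: faster
-- what changed: B drops the get_zero_index helper entirely and maintains a running zero count and last-zero index incrementally while extending each window, turning A's per-window rescan (three nested passes) into one inner pass per start index.
import Mathlib
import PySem

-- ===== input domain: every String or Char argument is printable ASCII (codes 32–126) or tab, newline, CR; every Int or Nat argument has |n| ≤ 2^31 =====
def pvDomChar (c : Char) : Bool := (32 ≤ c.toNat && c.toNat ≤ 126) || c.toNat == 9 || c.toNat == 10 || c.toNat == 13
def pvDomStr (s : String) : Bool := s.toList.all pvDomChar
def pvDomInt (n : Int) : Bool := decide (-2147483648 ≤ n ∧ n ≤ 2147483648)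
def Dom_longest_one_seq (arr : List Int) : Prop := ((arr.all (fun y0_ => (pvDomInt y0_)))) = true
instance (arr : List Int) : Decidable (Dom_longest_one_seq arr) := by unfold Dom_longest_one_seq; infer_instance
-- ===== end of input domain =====

-- B replaces A's per-window get_zero_index rescan by a running zero-count per start
-- index (one inner pass instead of nested rescans); faster in a timing run.

-- ===== PORT A =====
-- loop body of get_zero_index (arr[i] is always in range at A's call sites, so the
-- pyGetD default is never read)
def gzStep (arr : List Int) (st : Int × Int) (i : Int) : Int × Int :=
  if PySem.List.pyGetD arr i 1 = 0 then (st.1 + 1, i) else st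

def get_zero_index (arr : List Int) (start stop : Int) : Int :=
  let p := (PySem.List.pyRange start stop 1).foldl (gzStep arr) (0, 0)
  if p.1 ≠ 1 then -1 else p.2

-- body of A's inner j-loop; state is (length, idx)
def aStep (arr : List Int) (i : Int) (st : Int × Int) (j : Int) : Int × Int :=
  let zero_idx := get_zero_index arr i j
  if zero_idx < 0 then st
  else if j - i > st.1 then (j - i, zero_idx) else st

def longest_one_seq (arr : List Int) : Int :=
  let n : Int := arr.length
  let st := (PySem.List.pyRange 0 n 1).foldl
    (fun (st : Int × Int) i =>
      (PySem.List.pyRange (i + 1) (n + 1) 1).foldl (aStep arr i) st)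
    (0, -1)
  st.2

-- ===== PORT B =====
-- body of B's inner j-loop; state is (zeros, last, (length, idx))
def bStep (arr : List Int) (i : Int) (s : Int × Int × Int × Int) (j : Int) :
    Int × Int × Int × Int :=
  let zeros := if PySem.List.pyGetD arr j 1 = 0 then s.1 + 1 else s.1
  let last := if PySem.List.pyGetD arr j 1 = 0 then j else s.2.1
  if zeros = 1 ∧ j + 1 - i > s.2.2.1 then (zeros, last, j + 1 - i, last)
  else (zeros, last, s.2.2)

def longest_one_seq_alt (arr : List Int) : Int :=
  let n : Int := arr.length
  let st := (PySem.List.pyRange 0 n 1).foldl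
    (fun (st : Int × Int) i =>
      ((PySem.List.pyRange i n 1).foldl (bStep arr i) (0, -1, st)).2.2)
    (0, -1)
  st.2

-- ===== PRECONDITION & SPEC =====
def Spec_longest_one_seq (arr : List Int) (out : Int) : Prop := out = longest_one_seq_alt arr
instance (arr : List Int) (out : Int) : Decidable (Spec_longest_one_seq arr out) := by unfold Spec_longest_one_seq; infer_instance

-- ===== CLAIM (what is proved, stated in full; the proofs are below) =====
def Claim_equal_longest_one_seq : Prop := ∀ (arr : List Int), Dom_longest_one_seq arr → Spec_longest_one_seq arr (longest_one_seq arr)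

-- ===== LEMMAS AND PROOFS =====

-- the accumulator of get_zero_index's loop over range(i, j)
def gzAcc (arr : List Int) (i j : Int) : Int × Int :=
  (PySem.List.pyRange i j 1).foldl (gzStep arr) (0, 0)

theorem gzAcc_self (arr : List Int) (i : Int) : gzAcc arr i i = (0, 0) := by
  unfold gzAcc
  rw [PySem.List.pyRange_one_eq_nil (le_refl i)]
  rfl

theorem gzAcc_succ (arr : List Int) {i j : Int} (h : i ≤ j) :
    gzAcc arr i (j + 1) = gzStep arr (gzAcc arr i j) j := by
  unfold gzAcc
  rw [PySem.List.pyRange_one_succ_right h, List.foldl_append]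
  rfl

theorem gzAcc_idx_nonneg (arr : List Int) {i : Int} (hi : 0 ≤ i) :
    ∀ j, i ≤ j → 0 ≤ (gzAcc arr i j).2 := by
  intro j hj
  induction j, hj using Int.le_induction with
  | base => rw [gzAcc_self]
  | succ k hk ih =>
    rw [gzAcc_succ arr hk]
    unfold gzStep
    by_cases h : PySem.List.pyGetD arr k 1 = 0 <;> simp [h] <;> omega

theorem get_zero_index_eq (arr : List Int) (i j : Int) :
    get_zero_index arr i j =
      if (gzAcc arr i j).1 ≠ 1 then -1 else (gzAcc arr i j).2 := rfl

theorem step_eq (arr : List Int) (i j last : Int) (st : Int × Int)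
    (hi : 0 ≤ i) (hj : i ≤ j)
    (hl : (gzAcc arr i j).1 = 1 → last = (gzAcc arr i j).2) :
    bStep arr i ((gzAcc arr i j).1, last, st) j
      = ((gzAcc arr i (j + 1)).1,
         (if PySem.List.pyGetD arr j 1 = 0 then j else last),
         aStep arr i st (j + 1)) := by
  have hidx2 : 0 ≤ (gzAcc arr i j).2 := gzAcc_idx_nonneg arr hi j hj
  have hj0 : ¬ (j : Int) < 0 := by omega
  rcases hgz : gzAcc arr i j with ⟨c1, c2⟩
  rw [hgz] at hl hidx2
  unfold bStep aStep
  rw [get_zero_index_eq, gzAcc_succ arr hj, hgz]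
  unfold gzStep
  by_cases h0 : PySem.List.pyGetD arr j 1 = 0
  · by_cases hone : c1 + 1 = 1
    · by_cases hlen : j + 1 - i > st.1
      · simp [h0, hone, hlen, hj0]
      · simp [h0, hone, hlen, hj0]
    · simp [h0, hone]
  · by_cases hone : c1 = 1
    · have hlast : last = c2 := hl hone
      have : ¬ (c2 : Int) < 0 := by omega
      by_cases hlen : j + 1 - i > st.1
      · simp [h0, hone, hlen, hlast, this]
      · simp [h0, hone, hlen, hlast, this]
    · simp [h0, hone]

-- main inner-loop correspondence: B's running (zeros, last) pass over range(i, n)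
-- simulates A's per-window get_zero_index over range(i+1, n+1)
theorem inner_eq (arr : List Int) (i : Int) (hi : 0 ≤ i) :
    ∀ (m : Nat) (j : Int), i ≤ j →
      ∀ (last : Int), ((gzAcc arr i j).1 = 1 → last = (gzAcc arr i j).2) →
      ∀ (st : Int × Int),
      ((PySem.List.pyRange j (j + (m : Int)) 1).foldl (bStep arr i)
          ((gzAcc arr i j).1, last, st)).2.2
        = (PySem.List.pyRange (j + 1) (j + (m : Int) + 1) 1).foldl (aStep arr i) st := by
  intro m
  induction m with
  | zero =>
    intro j hj last hl st
    simp only [Nat.cast_zero, add_zero]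
    rw [PySem.List.pyRange_one_eq_nil (le_refl j),
        PySem.List.pyRange_one_eq_nil (le_refl (j + 1))]
    rfl
  | succ m ih =>
    intro j hj last hl st
    have hcast : j + ((m + 1 : Nat) : Int) = (j + 1) + (m : Int) := by push_cast; ring
    rw [hcast]
    have hlt : j < (j + 1) + (m : Int) := by
      have : (0 : Int) ≤ (m : Int) := Int.natCast_nonneg m
      omega
    have hlt1 : j + 1 < (j + 1) + (m : Int) + 1 := by
      have : (0 : Int) ≤ (m : Int) := Int.natCast_nonneg m
      omega
    rw [PySem.List.pyRange_one_cons hlt, PySem.List.pyRange_one_cons hlt1]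
    simp only [List.foldl_cons]
    rw [step_eq arr i j last st hi hj hl]
    -- apply the induction hypothesis at j + 1
    have hl' : (gzAcc arr i (j + 1)).1 = 1 →
        (if PySem.List.pyGetD arr j 1 = 0 then j else last) = (gzAcc arr i (j + 1)).2 := by
      intro hone
      rw [gzAcc_succ arr hj] at hone ⊢
      unfold gzStep at hone ⊢
      by_cases h0 : PySem.List.pyGetD arr j 1 = 0
      · simp [h0]
      · simp only [if_neg h0] at hone ⊢
        exact hl hone
    exact ih (j + 1) (by omega) _ hl' (aStep arr i st (j + 1))

theorem outer_step (arr : List Int) (i : Int) (hi : 0 ≤ i) (hn : i ≤ (arr.length : Int))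
    (st : Int × Int) :
    ((PySem.List.pyRange i (arr.length : Int) 1).foldl (bStep arr i) (0, -1, st)).2.2
      = (PySem.List.pyRange (i + 1) ((arr.length : Int) + 1) 1).foldl (aStep arr i) st := by
  have hm : (arr.length : Int) = i + (((arr.length : Int) - i).toNat : Int) := by omega
  have h0 : gzAcc arr i i = (0, 0) := gzAcc_self arr i
  have := inner_eq arr i hi ((arr.length : Int) - i).toNat i (le_refl i)
    (-1) (by rw [h0]; intro h; exact absurd h (by norm_num)) st
  rw [h0] at this
  rw [hm]
  exact this

-- ===== VERDICT (by name: the statement is the Claim_ definition above) =====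
theorem longest_one_seq_spec : Claim_equal_longest_one_seq := by
  intro arr _
  unfold Spec_longest_one_seq longest_one_seq longest_one_seq_alt
  have : (PySem.List.pyRange 0 (arr.length : Int) 1).foldl
      (fun (st : Int × Int) i =>
        (PySem.List.pyRange (i + 1) ((arr.length : Int) + 1) 1).foldl (aStep arr i) st)
      (0, -1)
    = (PySem.List.pyRange 0 (arr.length : Int) 1).foldl
      (fun (st : Int × Int) i =>
        ((PySem.List.pyRange i (arr.length : Int) 1).foldl (bStep arr i) (0, -1, st)).2.2)
      (0, -1) := by
    apply PySem.List.foldl_congr_mem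
    intro st i hmem
    rw [PySem.List.mem_pyRange_one] at hmem
    exact (outer_step arr i hmem.1 (le_of_lt hmem.2) st).symm
  simp only [this]
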